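-- pv_equiv track=rewrite | github.com/farukalpay/spectral-packet | src/spectral_packet_engine/qubit_mapping.py | _bk_remainder_set
-- ===== SOURCE A (Python) =====
-- def _bk_remainder_set(index: int) -> set[int]:
--     """Remainder set R(j) for BK encoding."""
--     if index == 0:
--         return set()
--     remainder = set()
--     idx = index
--     while idx > 0:
--         idx = idx & (idx - 1)
--         if idx > 0:
--             remainder.add(idx - 1)
--     return remainder
-- ===== SOURCE B (Python) =====
-- def _bk_remainder_set(index: int) -> set[int]:
--     """Remainder set R(j) for BK encoding: for every set bit of `index`
--     except the lowest one, the value of `index` with all lower bits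
--     cleared, minus one."""
--     if index <= 0:
--         return set()
--     positions = [p for p in range(index.bit_length()) if (index >> p) & 1]
--     return {((index >> p) << p) - 1 for p in positions[1:]}
-- ===== Notes on version B (the rewrite author's own statement) =====
-- stated objective: alternative
-- what changed: A destructively clears the lowest set bit in a while-loop and collects the decremented intermediate values; B first lists the set-bit positions and then computes each remainder element directly by a per-position shift formula (index with its lower bits cleared, decremented) over all set bits except the lowest, with no mutation of the index.
import Mathlib
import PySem

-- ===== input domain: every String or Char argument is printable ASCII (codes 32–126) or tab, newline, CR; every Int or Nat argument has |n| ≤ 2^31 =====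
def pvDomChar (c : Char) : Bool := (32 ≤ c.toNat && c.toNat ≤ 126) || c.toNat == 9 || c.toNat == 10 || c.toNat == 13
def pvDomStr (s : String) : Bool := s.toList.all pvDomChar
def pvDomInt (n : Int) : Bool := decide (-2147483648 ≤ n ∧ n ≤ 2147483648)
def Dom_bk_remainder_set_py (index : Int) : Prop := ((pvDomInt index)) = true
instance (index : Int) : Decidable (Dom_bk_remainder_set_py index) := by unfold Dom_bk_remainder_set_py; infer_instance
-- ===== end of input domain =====

-- B replaces A's destructive lowest-bit-clearing loop by a direct per-set-bit formula
-- (for every set bit except the lowest: index with its lower bits cleared, decremented);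
-- objective: alternative decomposition, same cost.

-- ===== PORT A =====
-- termination helper for the while-loop: idx & (idx - 1) strictly decreases while positive
theorem bkClear_toNat_lt (idx : Int) (h : 0 < idx) :
    (PySem.Int.band idx (idx - 1)).toNat < idx.toNat := by
  have h0 : (0:Int) ≤ idx := le_of_lt h
  have h1 : (0:Int) ≤ idx - 1 := by omega
  rw [PySem.Int.band_of_nonneg h0 h1]
  have h2 : idx.toNat &&& (idx - 1).toNat ≤ (idx - 1).toNat := Nat.and_le_right
  omega

-- while idx > 0: idx = idx & (idx - 1); if idx > 0: remainder.add(idx - 1)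
def bkLoopA (idx : Int) (remainder : PySem.Set Int) : PySem.Set Int :=
  if h : 0 < idx then
    let idx' := PySem.Int.band idx (idx - 1)
    bkLoopA idx' (if 0 < idx' then PySem.Set.add remainder (idx' - 1) else remainder)
  else remainder
termination_by idx.toNat
decreasing_by exact bkClear_toNat_lt idx h

def bk_remainder_set_py (index : Int) : List Int :=
  if index = 0 then PySem.Set.empty else bkLoopA index PySem.Set.empty

-- ===== PORT B =====
-- positions = [p for p in range(index.bit_length()) if (index >> p) & 1]
-- return {((index >> p) << p) - 1 for p in positions[1:]}
-- ('(index >> p) & 1' is truthy iff nonzero, ported as != 0; exact for every int)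
def bk_remainder_set_py_alt (index : Int) : List Int :=
  if index ≤ 0 then PySem.Set.empty
  else
    let positions : List Nat :=
      (List.range (PySem.Int.bitLength index)).filter
        (fun p => PySem.Int.band (index >>> p) 1 != 0)
    PySem.Set.ofList ((positions.drop 1).map (fun (p : Nat) => ((index >>> p) <<< p) - 1))

-- ===== PRECONDITION & SPEC =====
def Spec_bk_remainder_set_py (index : Int) (out : List Int) : Prop := out = bk_remainder_set_py_alt index
instance (index : Int) (out : List Int) : Decidable (Spec_bk_remainder_set_py index out) := by unfold Spec_bk_remainder_set_py; infer_instance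

-- ===== CLAIM (what is proved, stated in full; the proofs are below) =====
def Claim_equal_bk_remainder_set_py : Prop := ∀ (index : Int), Dom_bk_remainder_set_py index → Spec_bk_remainder_set_py index (bk_remainder_set_py index)

-- ===== LEMMAS AND PROOFS =====

-- Nat mirror of A's loop state update
def natClear (n : Nat) : Nat := n &&& (n - 1)

theorem natClear_lt {n : Nat} (h : 0 < n) : natClear n < n :=
  lt_of_le_of_lt (Nat.and_le_right) (by omega)

theorem natClear_le {n : Nat} : natClear n ≤ n - 1 := Nat.and_le_right

-- Nat mirror of A's loop output (as the list of added elements, in insertion order)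
def natLoop (n : Nat) : List Nat :=
  if h : 0 < n then
    let n' := natClear n
    if 0 < n' then (n' - 1) :: natLoop n' else []
  else []
termination_by n
decreasing_by exact natClear_lt h

-- Nat mirror of B's computation
def natBitLen (n : Nat) : Nat := PySem.Int.bitLength (n : Int)
def natPos (n : Nat) : List Nat :=
  (List.range (natBitLen n)).filter (fun p => (n >>> p) &&& 1 == 1)
def natVal (n p : Nat) : Nat := (n >>> p) <<< p - 1
def gall (n : Nat) : List Nat := (natPos n).map (natVal n)

-- ---- generic bridges ----
theorem natCast_shiftRight (n p : Nat) : ((n:Int) >>> p) = ((n >>> p : Nat) : Int) := by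
  simp [Int.shiftRight_eq_div_pow, Nat.shiftRight_eq_div_pow]

theorem natCast_shiftLeft (n p : Nat) : ((n:Int) <<< p) = ((n <<< p : Nat) : Int) := by
  simp [Int.shiftLeft_eq, Nat.shiftLeft_eq]

theorem and_two_mul_sub_one (m : Nat) (h : 0 < m) : (2*m) &&& (2*m-1) = 2*(m &&& (m-1)) := by
  have h1 : 2*m = Nat.bit false m := by simp [Nat.bit]
  have h2 : 2*m-1 = Nat.bit true (m-1) := by simp [Nat.bit]; omega
  rw [h2, h1]
  have := Nat.bitwise_bit (f := and) rfl false m true (m-1)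
  simpa [HAnd.hAnd, AndOp.and, Nat.land, Nat.bit] using this

theorem and_odd_even (m : Nat) : (2*m+1) &&& (2*m) = 2*m := by
  have h1 : 2*m+1 = Nat.bit true m := by simp [Nat.bit]
  have h2 : 2*m = Nat.bit false m := by simp [Nat.bit]
  rw [h1, h2]
  have := Nat.bitwise_bit (f := and) rfl true m false m
  have hs : Nat.bitwise and m m = m := Nat.and_self m
  simpa [HAnd.hAnd, AndOp.and, Nat.land, Nat.bit, hs] using this

theorem shiftRight_double (m b p : Nat) (hb : b ≤ 1) : (2*m+b) >>> (p+1) = m >>> p := by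
  rw [show p+1 = 1+p from by omega, Nat.shiftRight_add]
  congr 1
  rw [Nat.shiftRight_one]
  omega

theorem shiftRight_even (m p : Nat) : (2*m) >>> (p+1) = m >>> p := by
  have := shiftRight_double m 0 p (by omega); simpa using this

theorem shiftRight_odd (m p : Nat) : (2*m+1) >>> (p+1) = m >>> p :=
  shiftRight_double m 1 p (by omega)

theorem natClear_double (m : Nat) (h : 0 < m) : natClear (2*m) = 2 * natClear m := by
  unfold natClear
  have : 2*m - 1 = 2*m-1 := rfl
  exact and_two_mul_sub_one m h

theorem natVal_eq (n p : Nat) : natVal n p = (n >>> p) * 2^p - 1 := by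
  unfold natVal; rw [Nat.shiftLeft_eq]

theorem one_le_shiftLeft {n p : Nat} (h : 1 ≤ n >>> p) : 1 ≤ (n >>> p) <<< p := by
  rw [Nat.shiftLeft_eq]
  exact Nat.mul_le_mul h Nat.one_le_two_pow

theorem natVal_double_succ (m b p : Nat) (hb : b ≤ 1) (h : 1 ≤ m >>> p) :
    natVal (2*m+b) (p+1) = 2 * natVal m p + 1 := by
  rw [natVal_eq, natVal_eq, shiftRight_double m b p hb, pow_succ]
  have hp : 1 ≤ 2^p := Nat.one_le_two_pow
  have hl : 1 ≤ (m >>> p) * 2^p := Nat.mul_le_mul h hp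
  have hr : (m >>> p) * (2^p * 2) = ((m >>> p) * 2^p) * 2 := by ring
  rw [hr]
  omega

theorem natVal_even_succ (m p : Nat) (h : 1 ≤ m >>> p) :
    natVal (2*m) (p+1) = 2 * natVal m p + 1 := by
  have := natVal_double_succ m 0 p (by omega) h; simpa using this

theorem natVal_odd_succ (m p : Nat) (h : 1 ≤ m >>> p) :
    natVal (2*m+1) (p+1) = 2 * natVal m p + 1 :=
  natVal_double_succ m 1 p (by omega) h

-- ---- recursions for B's mirror ----
theorem natBitLen_zero : natBitLen 0 = 0 := PySem.Int.bitLength_zero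

theorem natBitLen_even (m : Nat) (h : 0 < m) : natBitLen (2*m) = natBitLen m + 1 := by
  unfold natBitLen
  rw [PySem.Int.bitLength_natCast (by omega)]
  congr 2
  omega

theorem natBitLen_odd (m : Nat) : natBitLen (2*m+1) = natBitLen m + 1 := by
  unfold natBitLen
  rw [PySem.Int.bitLength_natCast (by omega)]
  congr 2
  omega

theorem natPos_zero : natPos 0 = [] := by
  simp [natPos, natBitLen_zero]

theorem natPos_even (m : Nat) (h : 0 < m) : natPos (2*m) = (natPos m).map Nat.succ := by
  unfold natPos
  rw [natBitLen_even m h, List.range_succ_eq_map, List.filter_cons, List.filter_map]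
  have h0 : ((2*m) >>> 0 &&& 1 == 1) = false := by
    have : (2*m) &&& 1 = 0 := by rw [Nat.and_one_is_mod]; omega
    simp [this]
  rw [if_neg (by rw [h0]; simp)]
  congr 1
  apply List.filter_congr
  intro p _
  simp only [Function.comp_apply, Nat.succ_eq_add_one]
  rw [shiftRight_even m p]

theorem natPos_odd (m : Nat) : natPos (2*m+1) = 0 :: (natPos m).map Nat.succ := by
  unfold natPos
  rw [natBitLen_odd m, List.range_succ_eq_map, List.filter_cons, List.filter_map]
  have h0 : ((2*m+1) >>> 0 &&& 1 == 1) = true := by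
    have : (2*m+1) &&& 1 = 1 := by rw [Nat.and_one_is_mod]; omega
    simp [this]
  rw [if_pos h0]
  congr 2
  apply List.filter_congr
  intro p _
  simp only [Function.comp_apply, Nat.succ_eq_add_one]
  rw [shiftRight_odd m p]

theorem mem_natPos_odd_shift {m p : Nat} (h : p ∈ natPos m) : 1 ≤ m >>> p := by
  simp only [natPos, List.mem_filter, beq_iff_eq, Nat.and_one_is_mod] at h
  obtain ⟨-, h2⟩ := h
  generalize m >>> p = x at h2 ⊢
  omega

theorem gall_zero : gall 0 = [] := by simp [gall, natPos_zero]

theorem gall_even (m : Nat) (h : 0 < m) : gall (2*m) = (gall m).map (fun x => 2*x+1) := by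
  unfold gall
  rw [natPos_even m h, List.map_map, List.map_map]
  apply List.map_congr_left
  intro p hp
  simp only [Function.comp_apply, Nat.succ_eq_add_one]
  exact natVal_even_succ m p (mem_natPos_odd_shift hp)

theorem gall_odd (m : Nat) : gall (2*m+1) = 2*m :: (gall m).map (fun x => 2*x+1) := by
  unfold gall
  rw [natPos_odd m, List.map_cons, List.map_map, List.map_map]
  have hhead : natVal (2*m+1) 0 = 2*m := by rw [natVal_eq]; omega
  rw [hhead]
  congr 1
  apply List.map_congr_left
  intro p hp
  simp only [Function.comp_apply, Nat.succ_eq_add_one]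
  exact natVal_odd_succ m p (mem_natPos_odd_shift hp)

theorem gall_head (m : Nat) (h : 0 < m) : ∃ t, gall m = (m - 1) :: t := by
  induction m using Nat.strong_induction_on with
  | _ m ih =>
  rcases Nat.even_or_odd m with ⟨k, hk⟩ | ⟨k, hk⟩
  · have hk2 : m = 2*k := by omega
    have hk0 : 0 < k := by omega
    obtain ⟨t, ht⟩ := ih k (by omega) hk0
    exact ⟨t.map (fun x => 2*x+1),
      by rw [hk2, gall_even k hk0, ht, List.map_cons, show 2*(k-1)+1 = 2*k-1 from by omega]⟩
  · have hk2 : m = 2*k+1 := by omega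
    exact ⟨(gall k).map (fun x => 2*x+1),
      by rw [hk2, gall_odd k, show 2*k+1-1 = 2*k from by omega]⟩

theorem gall_nodup (n : Nat) : (gall n).Nodup := by
  induction n using Nat.strong_induction_on with
  | _ n ih =>
  rcases Nat.eq_zero_or_pos n with h0 | h0
  · subst h0; rw [gall_zero]; exact List.nodup_nil
  rcases Nat.even_or_odd n with ⟨k, hk⟩ | ⟨k, hk⟩
  · have hk2 : n = 2*k := by omega
    rw [hk2, gall_even k (by omega)]
    exact List.Nodup.map (fun a b h => by omega) (ih k (by omega))
  · have hk2 : n = 2*k+1 := by omega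
    rw [hk2, gall_odd k]
    refine List.Nodup.cons ?_ (List.Nodup.map (fun a b h => by omega) (ih k (by omega)))
    intro hmem
    obtain ⟨x, _, hx⟩ := List.mem_map.mp hmem
    omega

-- ---- A's loop mirror equals tail of gall ----
theorem natLoop_double (m : Nat) : natLoop (2*m) = (natLoop m).map (fun x => 2*x+1) := by
  induction m using Nat.strong_induction_on with
  | _ m ih =>
  rcases Nat.eq_zero_or_pos m with h0 | h0
  · subst h0; simp [natLoop]
  rw [natLoop, natLoop, dif_pos (by omega : 0 < 2*m), dif_pos h0]
  simp only [natClear_double m h0]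
  rcases Nat.eq_zero_or_pos (natClear m) with hc | hc
  · simp [hc]
  · rw [if_pos (by omega : 0 < 2 * natClear m), if_pos hc, List.map_cons,
      ih (natClear m) (natClear_lt h0), show 2*natClear m - 1 = 2*(natClear m - 1)+1 from by omega]

theorem map_tail {α β : Type} (f : α → β) (l : List α) : (l.map f).tail = l.tail.map f := by
  rw [← List.drop_one, ← List.drop_one, List.map_drop]

theorem natLoop_eq_tail_gall (n : Nat) : natLoop n = (gall n).tail := by
  induction n using Nat.strong_induction_on with
  | _ n ih =>
  rcases Nat.eq_zero_or_pos n with h0 | h0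
  · subst h0; rw [gall_zero]; simp [natLoop]
  rcases Nat.even_or_odd n with ⟨k, hk⟩ | ⟨k, hk⟩
  · have hk2 : n = 2*k := by omega
    have hk0 : 0 < k := by omega
    rw [hk2, natLoop_double, gall_even k hk0, map_tail, ih k (by omega)]
  · have hk2 : n = 2*k+1 := by omega
    rw [hk2, gall_odd k, List.tail_cons]
    rw [natLoop, dif_pos (by omega : 0 < 2*k+1)]
    simp only [show natClear (2*k+1) = 2*k from and_odd_even k]
    rcases Nat.eq_zero_or_pos k with hkz | hkz
    · subst hkz; simp [gall_zero]
    · rw [if_pos (by omega : 0 < 2*k), natLoop_double, ih k (by omega)]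
      obtain ⟨t, ht⟩ := gall_head k hkz
      rw [ht, List.tail_cons, List.map_cons, show 2*(k-1)+1 = 2*k-1 from by omega]

-- ---- Set.ofList on a Nodup list is the list itself ----
theorem foldl_add_nodup (l acc : List Int) (h : (acc ++ l).Nodup) :
    List.foldl PySem.Set.add acc l = acc ++ l := by
  induction l generalizing acc with
  | nil => simp
  | cons x xs ih =>
    have hx : x ∉ acc := by
      intro hmem
      exact (List.disjoint_of_nodup_append h) hmem (by simp)
    have hadd : PySem.Set.add acc x = acc ++ [x] := by
      simp [PySem.Set.add, hx]
    rw [List.foldl_cons, hadd, ih (acc ++ [x]) (by rwa [← List.append_cons])]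
    simp

theorem ofList_nodup {l : List Int} (h : l.Nodup) : PySem.Set.ofList l = l := by
  have := foldl_add_nodup l [] (by simpa using h)
  simpa [PySem.Set.ofList, PySem.Set.empty] using this

-- ---- bridging the actual ports ----
theorem loopA_eq (n : Nat) : ∀ (acc : List Int), (∀ x ∈ acc, (n:Int) - 1 ≤ x) →
    bkLoopA (n:Int) acc = acc ++ (natLoop n).map Int.ofNat := by
  induction n using Nat.strong_induction_on with
  | _ n ih =>
  intro acc hinv
  rcases Nat.eq_zero_or_pos n with h0 | h0
  · subst h0
    rw [bkLoopA, dif_neg (by omega), natLoop, dif_neg (by omega)]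
    simp
  rw [bkLoopA, dif_pos (by exact_mod_cast h0)]
  have hband : PySem.Int.band (n:Int) ((n:Int) - 1) = ((natClear n : Nat) : Int) := by
    rw [show ((n:Int) - 1) = ((n-1 : Nat) : Int) from by omega, PySem.Int.band_natCast]
    rfl
  simp only [hband]
  rcases Nat.eq_zero_or_pos (natClear n) with hc | hc
  · rw [if_neg (by simp [hc]), hc]
    rw [bkLoopA, dif_neg (by omega)]
    rw [natLoop, dif_pos h0, if_neg (by omega)]
    simp
  · have hcn : natClear n ≤ n - 1 := natClear_le
    rw [if_pos (by exact_mod_cast hc)]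
    have hadd : PySem.Set.add acc ((natClear n : Int) - 1) = acc ++ [(natClear n : Int) - 1] := by
      have hnm : ((natClear n : Int) - 1) ∉ acc := by
        intro hmem
        have := hinv _ hmem
        omega
      simp [PySem.Set.add, hnm]
    rw [hadd]
    have hrec := ih (natClear n) (natClear_lt h0) (acc ++ [(natClear n : Int) - 1]) (by
      intro x hx
      rcases List.mem_append.mp hx with hx | hx
      · have := hinv _ hx; omega
      · simp at hx; omega)
    rw [hrec]
    conv_rhs => rw [natLoop, dif_pos h0, if_pos hc]
    rw [List.map_cons, show (Int.ofNat (natClear n - 1)) = ((natClear n : Int) - 1) from by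
      rw [show Int.ofNat (natClear n - 1) = ((natClear n - 1 : Nat) : Int) from rfl]; omega]
    simp

theorem altB_eq (n : Nat) (h : 0 < n) :
    bk_remainder_set_py_alt (n:Int) = PySem.Set.ofList (((gall n).tail).map Int.ofNat) := by
  rw [bk_remainder_set_py_alt, if_neg (by omega)]
  have hfil : (List.range (PySem.Int.bitLength (n:Int))).filter
      (fun (p : Nat) => PySem.Int.band ((n:Int) >>> p) 1 != 0) = natPos n := by
    apply List.filter_congr
    intro p _
    rw [natCast_shiftRight, show (1:Int) = ((1:Nat):Int) from rfl, PySem.Int.band_natCast]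
    have hv : (n >>> p) &&& 1 = 0 ∨ (n >>> p) &&& 1 = 1 := by
      rw [Nat.and_one_is_mod]; omega
    rcases hv with hv | hv <;> simp [hv]
  show PySem.Set.ofList ((((List.range (PySem.Int.bitLength (n:Int))).filter
      (fun (p : Nat) => PySem.Int.band ((n:Int) >>> p) 1 != 0)).drop 1).map
      (fun (p : Nat) => ((n:Int) >>> p <<< p) - 1)) = _
  rw [hfil]
  congr 1
  have hmap : ((natPos n).drop 1).map (fun (p : Nat) => ((n:Int) >>> p <<< p) - 1)
      = ((natPos n).drop 1).map (fun p => Int.ofNat (natVal n p)) := by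
    apply List.map_congr_left
    intro p hp
    have hge : 1 ≤ (n >>> p) <<< p := one_le_shiftLeft (mem_natPos_odd_shift (List.mem_of_mem_drop hp))
    rw [natCast_shiftRight, natCast_shiftLeft]
    unfold natVal
    rw [show Int.ofNat ((n >>> p) <<< p - 1) = (((n >>> p) <<< p - 1 : Nat) : Int) from rfl]
    generalize (n >>> p) <<< p = x at hge ⊢
    omega
  rw [hmap]
  unfold gall
  rw [← List.drop_one, ← List.map_drop, List.map_map]
  rfl

-- ===== VERDICT (by name: the statement is the Claim_ definition above) =====
theorem bk_remainder_set_py_spec : Claim_equal_bk_remainder_set_py := by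
  intro index _
  unfold Spec_bk_remainder_set_py
  rcases lt_trichotomy index 0 with hneg | hz | hpos
  · rw [bk_remainder_set_py, bk_remainder_set_py_alt, if_neg (by omega), if_pos (by omega)]
    rw [bkLoopA]
    simp [not_lt.mpr (le_of_lt hneg)]
  · subst hz; rfl
  · obtain ⟨n, rfl⟩ : ∃ n : Nat, index = (n:Int) := ⟨index.toNat, by omega⟩
    have hn : 0 < n := by exact_mod_cast hpos
    rw [bk_remainder_set_py, if_neg (by omega), altB_eq n hn]
    rw [show (PySem.Set.empty : List Int) = [] from rfl]
    rw [loopA_eq n [] (by simp), natLoop_eq_tail_gall]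
    rw [ofList_nodup]
    · simp
    · exact List.Nodup.map (fun a b h => Int.ofNat.inj h)
        (List.Sublist.nodup (List.tail_sublist (gall n)) (gall_nodup n))
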